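-- pv_equiv track=rewrite | github.com/msoaresms/TrajetosOnibusManausPP1 | main.py | caminho
-- ===== SOURCE A (Python) =====
-- def passeio(grafo, sequencia):
--     if len(sequencia) != 1:
--         for i in range(0, len(sequencia)-1):
--             if (sequencia[i] in grafo) and (sequencia[i+1] in grafo[sequencia[i]]):
--                 y = 0
--             else:
--                 return False
--     else:
--         return False
--     return True
--
-- def caminho(grafoLocal, sequencia):
--     if passeio(grafoLocal, sequencia):
--         if sequencia[0] == sequencia[len(sequencia)-1]:
--             return False
--         else:
--             verticesVisitados = []
--             for i in range(0, len(sequencia)-1):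
--                 if sequencia[i] in verticesVisitados:
--                     return False
--                 else:
--                     if (sequencia[i] in grafoLocal) and (sequencia[i+1] in grafoLocal[sequencia[i]]):
--                         verticesVisitados.append(sequencia[i])
--     else:
--         return False
--     return True
-- ===== SOURCE B (Python) =====
-- def caminho(grafoLocal, sequencia):
--     # single-vertex sequence is never a caminho; [] still raises IndexError below
--     if len(sequencia) == 1:
--         return False
--     first = sequencia[0]
--     # edge validity: one pass over consecutive pairs (no indices)
--     if not all(u in grafoLocal and v in grafoLocal[u]
--                for u, v in zip(sequencia, sequencia[1:])):
--         return False
--     if first == sequencia[-1]: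
--         return False
--     # duplicate detection by sort-then-adjacent-scan over sequencia[:-1]
--     prefix = sorted(sequencia[:-1])
--     return all(a != b for a, b in zip(prefix, prefix[1:]))
-- ===== Notes on version B (the rewrite author's own statement) =====
-- stated objective: alternative
-- what changed: Replaces A's two index loops (passeio plus a second edge re-check loop growing a visited list probed by linear membership) with a zip-over-consecutive-pairs edge pass and a sort-then-adjacent-scan (comparison-based, no membership structure at all) for duplicate detection on sequencia[:-1]. Pre_ excludes only the empty sequence, on which both raise IndexError.
import Mathlib
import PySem

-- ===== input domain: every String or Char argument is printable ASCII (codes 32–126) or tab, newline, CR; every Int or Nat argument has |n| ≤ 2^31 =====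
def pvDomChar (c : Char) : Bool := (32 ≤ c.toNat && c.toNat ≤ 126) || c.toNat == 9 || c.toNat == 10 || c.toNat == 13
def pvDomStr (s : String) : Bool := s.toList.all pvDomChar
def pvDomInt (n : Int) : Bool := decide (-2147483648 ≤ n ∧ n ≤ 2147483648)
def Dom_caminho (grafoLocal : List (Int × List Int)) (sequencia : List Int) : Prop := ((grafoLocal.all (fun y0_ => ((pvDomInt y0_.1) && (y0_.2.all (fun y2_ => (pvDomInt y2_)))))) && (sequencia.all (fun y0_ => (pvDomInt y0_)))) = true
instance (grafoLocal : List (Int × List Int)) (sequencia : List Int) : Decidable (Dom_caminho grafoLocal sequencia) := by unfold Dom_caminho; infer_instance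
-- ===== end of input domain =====

-- B replaces A's two index loops (passeio + an edge re-check loop growing a visited
-- list) by a zip-over-consecutive-pairs edge pass and a sort-then-adjacent-scan for
-- the duplicate test; objective: alternative.

-- ===== PORT A =====
-- shared helper: '(u in grafo) and (v in grafo[u])' on the dict-as-assoc-list
-- (dict membership = some key equal; dict lookup = first matching pair)
def pvEdgeOk (g : List (Int × List Int)) (u v : Int) : Bool :=
  (g.any (fun p => p.1 == u)) && (((g.find? (fun p => p.1 == u)).elim [] Prod.snd).contains v)

-- the 'for i in range(0, len(sequencia)-1)' loop of passeio (early return False)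
def pvPasseioLoop (g : List (Int × List Int)) (seq : List Int) : List Nat → Bool
  | [] => true
  | i :: rest =>
    if pvEdgeOk g (seq.getD i 0) (seq.getD (i + 1) 0) then pvPasseioLoop g seq rest else false

def pvPasseio (g : List (Int × List Int)) (seq : List Int) : Bool :=
  if seq.length ≠ 1 then pvPasseioLoop g seq (List.range (seq.length - 1)) else false

-- the second loop of caminho, carrying verticesVisitados (early return False)
def pvCaminhoLoop (g : List (Int × List Int)) (seq : List Int) : List Nat → List Int → Bool
  | [], _ => true
  | i :: rest, visited =>
    if visited.contains (seq.getD i 0) then false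
    else if pvEdgeOk g (seq.getD i 0) (seq.getD (i + 1) 0) then
      pvCaminhoLoop g seq rest (visited ++ [seq.getD i 0])
    else
      pvCaminhoLoop g seq rest visited

def caminho (grafoLocal : List (Int × List Int)) (sequencia : List Int) : Bool :=
  if pvPasseio grafoLocal sequencia then
    -- sequencia[0] / sequencia[len-1]: in range whenever sequencia ≠ [] (Pre_);
    -- on [] the Python raises IndexError here (excluded by Pre_)
    if sequencia.getD 0 0 == sequencia.getD (sequencia.length - 1) 0 then false
    else pvCaminhoLoop grafoLocal sequencia (List.range (sequencia.length - 1)) []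
  else false

-- ===== PORT B =====
def caminho_alt (grafoLocal : List (Int × List Int)) (sequencia : List Int) : Bool :=
  if sequencia.length == 1 then false
  else
    -- first = sequencia[0]; raises IndexError on [] (excluded by Pre_)
    let first := sequencia.getD 0 0
    -- zip(sequencia, sequencia[1:]) = sequencia.zip sequencia.tail
    if ¬ ((sequencia.zip sequencia.tail).all (fun p => pvEdgeOk grafoLocal p.1 p.2)) then false
    else if first == PySem.List.pyGetD sequencia (-1) 0 then false
    else
      -- prefix = sorted(sequencia[:-1]); sequencia[:-1] = dropLast
      let pfx := PySem.List.sorted sequencia.dropLast (fun x => x) false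
      (pfx.zip pfx.tail).all (fun p => !(p.1 == p.2))

-- ===== PRECONDITION & SPEC =====
-- Pre_ excludes only the empty sequence, on which A raises IndexError (sequencia[0]).
def Pre_caminho (grafoLocal : List (Int × List Int)) (sequencia : List Int) : Prop :=
  sequencia ≠ []
instance (grafoLocal : List (Int × List Int)) (sequencia : List Int) : Decidable (Pre_caminho grafoLocal sequencia) := by unfold Pre_caminho; infer_instance

def pvWitness_caminho : (List (Int × List Int)) × List Int := ([(1, [2]), (2, [1])], [1, 2])

def Spec_caminho (grafoLocal : List (Int × List Int)) (sequencia : List Int) (out : Bool) : Prop := out = caminho_alt grafoLocal sequencia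
instance (grafoLocal : List (Int × List Int)) (sequencia : List Int) (out : Bool) : Decidable (Spec_caminho grafoLocal sequencia out) := by unfold Spec_caminho; infer_instance

-- ===== CLAIM (what is proved, stated in full; the proofs are below) =====
def Claim_equal_caminho : Prop := ∀ (grafoLocal : List (Int × List Int)) (sequencia : List Int), Dom_caminho grafoLocal sequencia → Pre_caminho grafoLocal sequencia → Spec_caminho grafoLocal sequencia (caminho grafoLocal sequencia)

-- ===== LEMMAS AND PROOFS =====

theorem pvPasseioLoop_eq_all (g : List (Int × List Int)) (seq : List Int) (is : List Nat) :
    pvPasseioLoop g seq is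
      = is.all (fun i => pvEdgeOk g (seq.getD i 0) (seq.getD (i + 1) 0)) := by
  induction is with
  | nil => rfl
  | cons i rest ih =>
    cases hf : pvEdgeOk g (seq.getD i 0) (seq.getD (i + 1) 0) <;>
      simp [pvPasseioLoop, ih]

theorem pvCaminhoLoop_eq_nodup (g : List (Int × List Int)) (seq : List Int) (is : List Nat)
    (hE : ∀ i ∈ is, pvEdgeOk g (seq.getD i 0) (seq.getD (i + 1) 0) = true) :
    ∀ visited : List Int,
      pvCaminhoLoop g seq is visited
        = decide ((is.map (fun i => seq.getD i 0)).Nodup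
            ∧ ∀ x ∈ is.map (fun i => seq.getD i 0), x ∉ visited) := by
  induction is with
  | nil => intro visited; simp [pvCaminhoLoop]
  | cons i rest ih =>
    intro visited
    have hi := hE i (by simp)
    have hrest : ∀ j ∈ rest, pvEdgeOk g (seq.getD j 0) (seq.getD (j + 1) 0) = true :=
      fun j hj => hE j (List.mem_cons_of_mem _ hj)
    by_cases hv : seq.getD i 0 ∈ visited
    · have hcv : visited.contains (seq.getD i 0) = true := by
        simp only [List.contains_eq_mem, decide_eq_true_eq]
        exact hv
      have h1 : pvCaminhoLoop g seq (i :: rest) visited = false := by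
        simp only [pvCaminhoLoop, hcv]
        simp
      rw [h1]
      symm
      simp only [decide_eq_false_iff_not]
      rintro ⟨-, hall⟩
      exact hall _ (by simp) hv
    · have hcv : visited.contains (seq.getD i 0) = false := by
        simp only [List.contains_eq_mem, decide_eq_false_iff_not]
        exact hv
      have h1 : pvCaminhoLoop g seq (i :: rest) visited
          = pvCaminhoLoop g seq rest (visited ++ [seq.getD i 0]) := by
        simp only [pvCaminhoLoop, hcv, hi]
        simp
      rw [h1, ih hrest, decide_eq_decide]
      simp only [List.map_cons]
      constructor
      · rintro ⟨hnd, hall⟩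
        refine ⟨List.nodup_cons.2 ⟨?_, hnd⟩, ?_⟩
        · intro hmem
          exact (hall _ hmem) (List.mem_append.2 (Or.inr (List.mem_singleton.2 rfl)))
        · intro z hz
          rcases List.mem_cons.1 hz with rfl | hz'
          · exact hv
          · intro hzv
            exact (hall z hz') (List.mem_append.2 (Or.inl hzv))
      · rintro ⟨hnd0, hall⟩
        obtain ⟨hni, hnd⟩ := List.nodup_cons.1 hnd0
        refine ⟨hnd, ?_⟩
        intro z hz hzm
        rcases List.mem_append.1 hzm with h' | h'
        · exact (hall z (List.mem_cons.2 (Or.inr hz))) h'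
        · rw [List.mem_singleton.1 h'] at hz
          exact hni hz

theorem pvMapRange_eq_dropLast (seq : List Int) :
    (List.range (seq.length - 1)).map (fun i => seq.getD i 0) = seq.dropLast := by
  apply List.ext_getElem
  · simp [List.length_dropLast]
  · intro k h1 h2
    simp only [List.getElem_map, List.getElem_range, List.getElem_dropLast]
    have hk : k < seq.length := by
      have := h2; simp [List.length_dropLast] at this; omega
    simp [List.getD_eq_getElem?_getD, List.getElem?_eq_getElem hk]

-- B's zip edge pass equals A's index-range edge pass
theorem pvZipEdges_eq_range (g : List (Int × List Int)) :
    ∀ seq : List Int,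
      ((seq.zip seq.tail).all (fun p => pvEdgeOk g p.1 p.2))
        = (List.range (seq.length - 1)).all
            (fun i => pvEdgeOk g (seq.getD i 0) (seq.getD (i + 1) 0))
  | [] => by simp
  | [x] => by simp
  | x :: y :: tl => by
    have ih := pvZipEdges_eq_range g (y :: tl)
    simp only [List.tail_cons] at ih
    simp only [List.zip_cons_cons, List.tail_cons, List.all_cons]
    rw [ih]
    simp only [List.length_cons, Nat.add_sub_cancel, List.range_succ_eq_map,
      List.all_cons, List.all_map, Function.comp_def]
    simp

-- adjacent-distinct scan on a ≤-sorted list detects exactly Nodup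
theorem pvAdjScan_nodup : ∀ l : List Int, l.Pairwise (· ≤ ·) →
    (((l.zip l.tail).all (fun p => !(p.1 == p.2))) = true ↔ l.Nodup)
  | [] => by simp
  | [x] => by simp
  | a :: b :: tl => by
    intro hp
    have hab : a ≤ b := (List.pairwise_cons.1 hp).1 b (by simp)
    have hp' : (b :: tl).Pairwise (· ≤ ·) := (List.pairwise_cons.1 hp).2
    have hbtl : ∀ x ∈ tl, b ≤ x := (List.pairwise_cons.1 hp').1
    have ih := pvAdjScan_nodup (b :: tl) hp'
    simp only [List.zip_cons_cons, List.tail_cons, List.all_cons, Bool.and_eq_true] at ih ⊢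
    constructor
    · rintro ⟨hne, hrest⟩
      have hanb : a ≠ b := by simpa using hne
      have hnd : (b :: tl).Nodup := ih.1 hrest
      refine List.nodup_cons.2 ⟨?_, hnd⟩
      intro hmem
      rcases List.mem_cons.1 hmem with rfl | hmem'
      · exact hanb rfl
      · have hbx := hbtl a hmem'
        exact hanb (le_antisymm hab (le_trans hbx (le_refl a))) |>.elim
    · intro hnd
      obtain ⟨hna, hnd'⟩ := List.nodup_cons.1 hnd
      refine ⟨?_, ih.2 hnd'⟩
      simp only [Bool.not_eq_true', beq_eq_false_iff_ne, ne_eq]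
      intro h
      exact hna (by simp [h])

-- ===== VERDICT (by name: the statement is the Claim_ definition above) =====
theorem caminho_spec : Claim_equal_caminho := by
  intro g seq _ hpre
  unfold Spec_caminho caminho caminho_alt pvPasseio
  rw [pvPasseioLoop_eq_all, pvZipEdges_eq_range]
  match seq, hpre with
  | [x], _ => norm_num
  | x :: y :: tl, _ =>
    have hn1 : (x :: y :: tl).length ≠ 1 := by simp
    rw [if_pos hn1, if_neg (by simp : ¬ (((x :: y :: tl).length == 1) = true))]
    dsimp only
    have hlast : PySem.List.pyGetD (x :: y :: tl) (-1) 0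
        = (x :: y :: tl).getD ((x :: y :: tl).length - 1) 0 := by
      rw [PySem.List.pyGetD_neg_one (x :: y :: tl) 0 (by simp)]
      rw [List.getLast_eq_getElem]
      rw [List.getD_eq_getElem?_getD, List.getElem?_eq_getElem (by simp)]
      rfl
    rw [hlast]
    by_cases hE : ((List.range ((x :: y :: tl).length - 1)).all
        (fun i => pvEdgeOk g ((x :: y :: tl).getD i 0) ((x :: y :: tl).getD (i + 1) 0))) = true
    · by_cases hfl : (((x :: y :: tl).getD 0 0 == (x :: y :: tl).getD ((x :: y :: tl).length - 1) 0)) = true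
      · rw [if_pos hE, if_pos hfl, if_pos hfl, ite_self]
      · rw [if_pos hE, if_neg hfl, if_neg hfl, if_neg (not_not_intro hE)]
        have hEall : ∀ i ∈ List.range ((x :: y :: tl).length - 1),
            pvEdgeOk g ((x :: y :: tl).getD i 0) ((x :: y :: tl).getD (i + 1) 0) = true :=
          List.all_eq_true.1 hE
        rw [pvCaminhoLoop_eq_nodup g _ _ hEall]
        rw [pvMapRange_eq_dropLast]
        have hperm : (PySem.List.sorted (x :: y :: tl).dropLast (fun z => z) false).Perm
            (x :: y :: tl).dropLast := PySem.List.sorted_perm _ _ _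
        have hpw : (PySem.List.sorted (x :: y :: tl).dropLast (fun z => z) false).Pairwise
            (fun a b => a ≤ b) := PySem.List.sorted_pairwise _ _
        have hadj := pvAdjScan_nodup _ hpw
        rw [Bool.eq_iff_iff, hadj, hperm.nodup_iff]
        simp
    · rw [if_neg hE]
      by_cases hfl : (((x :: y :: tl).getD 0 0 == (x :: y :: tl).getD ((x :: y :: tl).length - 1) 0)) = true
      · rw [if_pos hfl, ite_self]
      · rw [if_neg hfl, if_pos (by simpa using hE)]
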